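-- pv_equiv track=rewrite | github.com/globalw/ilp_schedule | airfraight/composition/gen_data_loading_systems.py | construct_airfraight_loadindsystems
-- ===== SOURCE A (Python) =====
-- def construct_airfraight_loadindsystems(n):
--     # genereate fleet
--     loadingsystems = dict()
--     for i in range(n):
--         if i == 0:
--             w = 250
--             loadingsystems[i] = w
--         if i == 1:
--             w = 200
--             loadingsystems[i] = w
--         if i == 2:
--             w = 170
--             loadingsystems[i] = w
--         if (i < int(n*0.25) and i > 2):
--             w = 140
--             loadingsystems[i] = w
--         if (i < int(n*0.5) and i > 5):
--             w = 110
--             loadingsystems[i] = w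
--         if (i < int(n*0.75) and i > 9):
--             w = 80
--             loadingsystems[i] = w
--         if  i >= int(n*0.75):
--             w = 50
--             loadingsystems[i] = w
--
--     return loadingsystems
-- ===== SOURCE B (Python) =====
-- def construct_airfraight_loadindsystems(n):
--     # Band table: fill the dict by successive range passes; a later pass
--     # overwrites any overlap with an earlier one.
--     d = {}
--     if n > 0:
--         d[0] = 250
--     if n > 1:
--         d[1] = 200
--     if n > 2:
--         d[2] = 170
--     for i in range(3, n // 4):
--         d[i] = 140
--     for i in range(6, n // 2):
--         d[i] = 110
--     for i in range(10, 3 * n // 4):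
--         d[i] = 80
--     for i in range(3 * n // 4, n):
--         d[i] = 50
--     return d
-- ===== Notes on version B (the rewrite author's own statement) =====
-- stated objective: faster
-- what changed: Replaces A's single loop over range(n) with seven per-index conditional inserts by a band-table construction: three seed assignments plus four range-fill passes (weights 140, 110, 80, 50 over their index bands) where each later pass overwrites its overlap with earlier ones; integer // replaces int(n*0.25) floats (exact for |n| <= 2^31).
import Mathlib
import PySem

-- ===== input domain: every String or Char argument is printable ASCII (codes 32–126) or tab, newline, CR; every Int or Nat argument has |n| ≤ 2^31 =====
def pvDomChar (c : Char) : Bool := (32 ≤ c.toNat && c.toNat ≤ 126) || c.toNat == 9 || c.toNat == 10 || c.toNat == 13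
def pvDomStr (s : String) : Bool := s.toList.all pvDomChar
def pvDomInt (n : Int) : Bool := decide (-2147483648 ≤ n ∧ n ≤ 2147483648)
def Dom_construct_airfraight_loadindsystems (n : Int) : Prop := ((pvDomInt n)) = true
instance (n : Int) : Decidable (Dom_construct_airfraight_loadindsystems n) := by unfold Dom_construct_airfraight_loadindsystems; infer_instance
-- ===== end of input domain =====

-- B replaces A's single per-index loop (seven sequential conditional inserts per i) by a band-table
-- construction: three seed assignments plus four range-fill passes, each later pass overwriting its
-- overlap with earlier ones, with no per-index branch tests (objective: faster by a constant factor, as measured).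
-- int(n*0.25)/int(n*0.5)/int(n*0.75) are exact floats for |n| ≤ 2^31; for the n>0 iterations that use
-- them int-truncation = floor, so both ports use PySem.Int.floordiv.

-- ===== PORT A =====
-- the body of A's for-loop: seven independent ifs, each mutating the dict (later assignments overwrite)
def pvStepA (n : Int) (d : PySem.Dict Int Int) (i : Int) : PySem.Dict Int Int :=
  let d := if i = 0 then d.insert i 250 else d
  let d := if i = 1 then d.insert i 200 else d
  let d := if i = 2 then d.insert i 170 else d
  let d := if i < PySem.Int.floordiv n 4 ∧ i > 2 then d.insert i 140 else d
  let d := if i < PySem.Int.floordiv n 2 ∧ i > 5 then d.insert i 110 else d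
  let d := if i < PySem.Int.floordiv (3 * n) 4 ∧ i > 9 then d.insert i 80 else d
  let d := if i ≥ PySem.Int.floordiv (3 * n) 4 then d.insert i 50 else d
  d

def construct_airfraight_loadindsystems (n : Int) : List (Int × Int) :=
  ((PySem.List.pyRange 0 n 1).foldl (pvStepA n) PySem.Dict.empty).items

-- ===== PORT B =====
-- Source B: three seed assignments, then four range-fill passes; later passes overwrite earlier ones
def construct_airfraight_loadindsystems_alt (n : Int) : List (Int × Int) :=
  let d : PySem.Dict Int Int := PySem.Dict.empty
  let d := if n > 0 then d.insert 0 250 else d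
  let d := if n > 1 then d.insert 1 200 else d
  let d := if n > 2 then d.insert 2 170 else d
  let d := (PySem.List.pyRange 3 (PySem.Int.floordiv n 4) 1).foldl (fun d i => d.insert i 140) d
  let d := (PySem.List.pyRange 6 (PySem.Int.floordiv n 2) 1).foldl (fun d i => d.insert i 110) d
  let d := (PySem.List.pyRange 10 (PySem.Int.floordiv (3 * n) 4) 1).foldl (fun d i => d.insert i 80) d
  let d := (PySem.List.pyRange (PySem.Int.floordiv (3 * n) 4) n 1).foldl (fun d i => d.insert i 50) d
  d.items

-- ===== PRECONDITION & SPEC =====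
def Spec_construct_airfraight_loadindsystems (n : Int) (out : List (Int × Int)) : Prop := out = construct_airfraight_loadindsystems_alt n
instance (n : Int) (out : List (Int × Int)) : Decidable (Spec_construct_airfraight_loadindsystems n out) := by unfold Spec_construct_airfraight_loadindsystems; infer_instance

-- ===== CLAIM (what is proved, stated in full; the proofs are below) =====
def Claim_equal_construct_airfraight_loadindsystems : Prop := ∀ (n : Int), Dom_construct_airfraight_loadindsystems n → Spec_construct_airfraight_loadindsystems n (construct_airfraight_loadindsystems n)

-- ===== LEMMAS AND PROOFS =====

-- proof-side characterisation of A's per-index result: which indices are assigned, and the final weight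
def pvWeightB (c i : Int) : Int :=
  if i ≥ c then 50
  else if i > 9 then 80
  else if i > 5 then 110
  else if i > 2 then 140
  else if i = 2 then 170
  else if i = 1 then 200
  else 250

def pvAssignedB (a b c i : Int) : Bool :=
  i < 3 || i > 9 || i ≥ c || i < a || (5 < i && i < b)

-- one loop iteration of A appends exactly the (filtered, weighted) pair
set_option maxHeartbeats 2000000 in
lemma pvStepA_items (n : Int) (d : PySem.Dict Int Int) (i : Int)
    (hi : 0 ≤ i)
    (hab : PySem.Int.floordiv n 4 ≤ PySem.Int.floordiv n 2)
    (hc : d.contains i = false) :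
    (pvStepA n d i).items =
      d.items ++ (if pvAssignedB (PySem.Int.floordiv n 4) (PySem.Int.floordiv n 2)
                      (PySem.Int.floordiv (3 * n) 4) i = true
                  then [(i, pvWeightB (PySem.Int.floordiv (3 * n) 4) i)] else []) := by
  unfold pvStepA pvAssignedB pvWeightB
  simp only [Bool.or_eq_true, Bool.and_eq_true, decide_eq_true_eq]
  set a := PySem.Int.floordiv n 4 with ha
  set b := PySem.Int.floordiv n 2 with hb
  set c := PySem.Int.floordiv (3 * n) 4 with hcc
  clear_value a b c
  clear ha hb hcc
  split_ifs
  all_goals try simp only [PySem.Dict.insert_insert_self]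
  all_goals try rw [PySem.Dict.items_insert_of_not_contains _ _ hc]
  all_goals try simp only [List.append_nil, List.append_cancel_left_eq, List.cons.injEq,
    Prod.mk.injEq, and_true, true_and, List.cons_ne_nil, List.append_right_eq_self,
    List.self_eq_append_right]
  all_goals first | rfl | omega

-- every key of A's accumulated dict lies in [0, j)
lemma pvKeys_lt (n : Int) (j : Nat)
    (h : ((PySem.List.pyRange 0 (j : Int) 1).foldl (pvStepA n) PySem.Dict.empty).items =
      ((PySem.List.pyRange 0 (j : Int) 1).filter
        (fun i => pvAssignedB (PySem.Int.floordiv n 4) (PySem.Int.floordiv n 2)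
          (PySem.Int.floordiv (3 * n) 4) i)).map
        (fun i => (i, pvWeightB (PySem.Int.floordiv (3 * n) 4) i)))
    (k : Int) (hk : k ∈ ((PySem.List.pyRange 0 (j : Int) 1).foldl (pvStepA n) PySem.Dict.empty).keys) :
    k < (j : Int) := by
  unfold PySem.Dict.keys at hk
  rw [h] at hk
  simp only [List.map_map, List.mem_map, List.mem_filter] at hk
  obtain ⟨i, ⟨hmem, _⟩, rfl⟩ := hk
  exact ((PySem.List.mem_pyRange_one).mp hmem).2

-- loop invariant: A's fold over range(j) produces exactly the filtered, weighted list
lemma pvFoldA (n : Int)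
    (hab : PySem.Int.floordiv n 4 ≤ PySem.Int.floordiv n 2) (j : Nat) :
    ((PySem.List.pyRange 0 (j : Int) 1).foldl (pvStepA n) PySem.Dict.empty).items =
      ((PySem.List.pyRange 0 (j : Int) 1).filter
        (fun i => pvAssignedB (PySem.Int.floordiv n 4) (PySem.Int.floordiv n 2)
          (PySem.Int.floordiv (3 * n) 4) i)).map
        (fun i => (i, pvWeightB (PySem.Int.floordiv (3 * n) 4) i)) := by
  induction j with
  | zero => simp [PySem.List.pyRange_one_eq_nil (by omega : (0:Int) ≤ 0)]; rfl
  | succ j ih =>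
      have hcast : ((j + 1 : Nat) : Int) = (j : Int) + 1 := by push_cast; ring
      rw [hcast, PySem.List.pyRange_one_succ_right (by positivity)]
      rw [List.foldl_append, List.filter_append, List.map_append]
      have hcont : ((PySem.List.pyRange 0 (j : Int) 1).foldl (pvStepA n) PySem.Dict.empty).contains (j : Int) = false := by
        rw [Bool.eq_false_iff]
        intro h
        have := pvKeys_lt n j ih (j : Int) ((PySem.Dict.contains_iff_mem_keys _ _).mp h)
        omega
      simp only [List.foldl_cons, List.foldl_nil]
      rw [pvStepA_items n _ (j : Int) (by positivity) hab hcont, ih]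
      by_cases hA : pvAssignedB (PySem.Int.floordiv n 4) (PySem.Int.floordiv n 2)
          (PySem.Int.floordiv (3 * n) 4) (j : Int) = true
      · rw [if_pos hA, List.filter_cons_of_pos hA, List.filter_nil, List.map_cons, List.map_nil]
      · rw [if_neg hA, List.filter_cons_of_neg hA, List.filter_nil, List.map_nil]

-- overwriting pass: inserting w over exactly the keys of the dict's tail rewrites the tail in place
lemma pvOverwrite (w : Int) (g : Int → Int) (k : Nat) :
    ∀ (lo : Int) (P : List (Int × Int)) (d : PySem.Dict Int Int),
    d.items = P ++ (PySem.List.pyRange lo (lo + k) 1).map (fun i => (i, g i)) →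
    (∀ p ∈ P, p.1 < lo) →
    ((PySem.List.pyRange lo (lo + k) 1).foldl (fun d i => d.insert i w) d).items =
      P ++ (PySem.List.pyRange lo (lo + k) 1).map (fun i => (i, w)) := by
  induction k with
  | zero =>
      intro lo P d hd _
      rw [show lo + (0 : Nat) = lo by push_cast; ring] at *
      rw [PySem.List.pyRange_one_eq_nil le_rfl] at *
      simpa using hd
  | succ k ih =>
      intro lo P d hd hP
      have hr : PySem.List.pyRange lo (lo + (k + 1 : Nat)) 1 =
          lo :: PySem.List.pyRange (lo + 1) (lo + (k + 1 : Nat)) 1 :=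
        PySem.List.pyRange_one_cons (by push_cast; omega)
      have hcast : lo + ((k + 1 : Nat) : Int) = (lo + 1) + (k : Nat) := by push_cast; ring
      rw [hr, List.foldl_cons, List.map_cons]
      -- the head insert overwrites the (lo, g lo) entry in place
      have hcont : d.contains lo = true := by
        rw [PySem.Dict.contains_iff_mem_keys]
        unfold PySem.Dict.keys
        rw [hd, hr]
        simp
      have hitems : (d.insert lo w).items =
          (P ++ [(lo, w)]) ++ (PySem.List.pyRange (lo + 1) (lo + (k + 1 : Nat)) 1).map (fun i => (i, g i)) := by
        rw [PySem.Dict.items_insert_of_contains _ _ hcont, hd, hr, List.map_cons, List.map_append,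
          List.map_cons, List.map_map]
        have hPmap : P.map (fun p => if p.1 == lo then (lo, w) else p) = P := by
          conv_rhs => rw [← List.map_id P]
          apply List.map_congr_left
          intro p hp
          simp [show ¬ p.1 = lo from ne_of_lt (hP p hp)]
        have hTmap : (PySem.List.pyRange (lo + 1) (lo + (k + 1 : Nat)) 1).map
              ((fun p => if p.1 == lo then (lo, w) else p) ∘ fun i => (i, g i)) =
            (PySem.List.pyRange (lo + 1) (lo + (k + 1 : Nat)) 1).map (fun i => (i, g i)) := by
          apply List.map_congr_left
          intro i hi
          have := (PySem.List.mem_pyRange_one.mp hi).1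
          simp only [Function.comp]
          simp [show ¬ i = lo by omega]
        rw [hPmap, hTmap]
        simp
      have := ih (lo + 1) (P ++ [(lo, w)]) (d.insert lo w)
        (by rw [hitems, hcast]) (by
          intro p hp
          rcases List.mem_append.mp hp with h | h
          · exact lt_trans (hP p h) (by omega)
          · simp at h; subst h; show lo < lo + 1; omega)
      rw [hcast, this]
      simp

-- appending pass: inserting fresh distinct keys appends the pairs in order
lemma pvFresh (w : Int) (l : List Int) :
    ∀ (d : PySem.Dict Int Int), (∀ i ∈ l, d.contains i = false) → l.Nodup →
    (l.foldl (fun d i => d.insert i w) d).items = d.items ++ l.map (fun i => (i, w)) := by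
  induction l with
  | nil => intro d _ _; simp
  | cons i l ih =>
      intro d hc hnd
      rw [List.foldl_cons, List.map_cons]
      rw [ih (d.insert i w)
        (by
          intro j hj
          rw [PySem.Dict.contains_insert]
          have : ¬ j = i := by rintro rfl; exact (List.nodup_cons.mp hnd).1 hj
          simp [this, hc j (List.mem_cons_of_mem _ hj)])
        (List.nodup_cons.mp hnd).2]
      rw [PySem.Dict.items_insert_of_not_contains _ _ (hc i (List.mem_cons_self))]
      simp

-- one range-fill pass of B: the dict's tail (keys ≥ lo, exactly [lo,t)) is rewritten in place to w
-- and the fresh keys [t,hi) are appended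
lemma pvStage (w : Int) (g : Int → Int) (lo t hi : Int) (P : List (Int × Int)) (d : PySem.Dict Int Int)
    (hlt : lo ≤ t) (hth : t ≤ hi)
    (hd : d.items = P ++ (PySem.List.pyRange lo t 1).map (fun i => (i, g i)))
    (hP : ∀ p ∈ P, p.1 < lo) :
    ((PySem.List.pyRange lo hi 1).foldl (fun d i => d.insert i w) d).items =
      P ++ (PySem.List.pyRange lo hi 1).map (fun i => (i, w)) := by
  have hk : t = lo + ((t - lo).toNat : Int) := by omega
  rw [PySem.List.pyRange_one_append lo t hi hlt hth, List.foldl_append, List.map_append]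
  rw [hk] at hd
  have h1 := pvOverwrite w g (t - lo).toNat lo P d hd hP
  rw [← hk] at h1
  rw [pvFresh w (PySem.List.pyRange t hi 1) _
    (by
      intro j hj
      have hjt := (PySem.List.mem_pyRange_one.mp hj).1
      rw [Bool.eq_false_iff]
      intro hcon
      have hmem := (PySem.Dict.contains_iff_mem_keys _ _).mp hcon
      unfold PySem.Dict.keys at hmem
      rw [h1] at hmem
      obtain ⟨x, hx, rfl⟩ := List.mem_map.mp hmem
      rcases List.mem_append.mp hx with hx | hx
      · exact absurd (hP x hx) (by omega)
      · obtain ⟨i, hi3, rfl⟩ := List.mem_map.mp hx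
        have := (PySem.List.mem_pyRange_one.mp hi3).2
        simp at hjt
        omega)
    (PySem.List.nodup_pyRange_one t hi)]
  rw [h1, List.append_assoc]

-- split a range at m, collapsing to min/max bounds so both the m ≤ hi and hi < m cases are one formula
lemma pvSplitMinMax (lo m hi : Int) (h : lo ≤ m) :
    PySem.List.pyRange lo hi 1 =
      PySem.List.pyRange lo (min hi m) 1 ++ PySem.List.pyRange m (max hi m) 1 := by
  by_cases hc : hi ≤ m
  · rw [min_eq_left hc, max_eq_right hc, PySem.List.pyRange_one_eq_nil le_rfl, List.append_nil]
  · rw [min_eq_right (by omega : m ≤ hi), max_eq_left (by omega : m ≤ hi)]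
    exact PySem.List.pyRange_one_append lo m hi h (by omega)

-- filter/map over a kept segment: constant weight
lemma pvSegKeep (p : Int → Bool) (f : Int → Int × Int) (lo hi w : Int)
    (h : ∀ i, lo ≤ i → i < hi → p i = true ∧ f i = (i, w)) :
    ((PySem.List.pyRange lo hi 1).filter p).map f =
      (PySem.List.pyRange lo hi 1).map (fun i => (i, w)) := by
  rw [List.filter_eq_self.mpr (by
    intro i hi2
    have := PySem.List.mem_pyRange_one.mp hi2
    exact (h i this.1 this.2).1)]
  apply List.map_congr_left
  intro i hi2
  have := PySem.List.mem_pyRange_one.mp hi2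
  exact (h i this.1 this.2).2

-- filter over a dropped segment
lemma pvSegDrop (p : Int → Bool) (lo hi : Int) (h : ∀ i, lo ≤ i → i < hi → p i = false) :
    (PySem.List.pyRange lo hi 1).filter p = [] := by
  rw [List.filter_eq_nil_iff]
  intro i hi2
  have := PySem.List.mem_pyRange_one.mp hi2
  simp [h i this.1 this.2]

-- B's staged construction, computed in closed form for n ≥ 16
lemma pvAltItems (n : Int) (h16 : 16 ≤ n) :
    construct_airfraight_loadindsystems_alt n =
      [((0:Int), (250:Int)), (1, 200), (2, 170)]
        ++ (PySem.List.pyRange 3 (min (PySem.Int.floordiv n 4) 6) 1).map (fun i => (i, 140))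
        ++ (PySem.List.pyRange 6 (min (PySem.Int.floordiv n 2) 10) 1).map (fun i => (i, 110))
        ++ (PySem.List.pyRange 10 (PySem.Int.floordiv (3 * n) 4) 1).map (fun i => (i, 80))
        ++ (PySem.List.pyRange (PySem.Int.floordiv (3 * n) 4) n 1).map (fun i => (i, 50)) := by
  have hfd4 : PySem.Int.floordiv n 4 = n / 4 := PySem.Int.floordiv_eq_ediv_of_pos (by omega)
  have hfd2 : PySem.Int.floordiv n 2 = n / 2 := PySem.Int.floordiv_eq_ediv_of_pos (by omega)
  have hfd34 : PySem.Int.floordiv (3 * n) 4 = (3 * n) / 4 := PySem.Int.floordiv_eq_ediv_of_pos (by omega)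
  simp only [construct_airfraight_loadindsystems_alt]
  rw [if_pos (show n > 0 by omega), if_pos (show n > 1 by omega), if_pos (show n > 2 by omega)]
  set a := PySem.Int.floordiv n 4 with ha
  set b := PySem.Int.floordiv n 2 with hb
  set c := PySem.Int.floordiv (3 * n) 4 with hc
  rw [hfd4] at ha; rw [hfd2] at hb; rw [hfd34] at hc
  -- stage 140 over [3, a): fresh append onto the three seeds
  have h140 := pvStage 140 (fun _ => (0:Int)) 3 3 a [((0:Int), (250:Int)), (1, 200), (2, 170)]
    ((((PySem.Dict.empty : PySem.Dict Int Int).insert 0 250).insert 1 200).insert 2 170)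
    le_rfl (by omega)
    (by rw [PySem.List.pyRange_one_eq_nil le_rfl]; rfl)
    (by intro p hp; fin_cases hp <;> simp)
  -- stage 110 over [6, b): overwrites the 140-keys ≥ 6, appends up to b
  have h110 := pvStage 110 (fun _ => (140:Int)) 6 (max a 6) b
    ([((0:Int), (250:Int)), (1, 200), (2, 170)] ++ (PySem.List.pyRange 3 (min a 6) 1).map (fun i => (i, 140)))
    _ (by omega) (by omega)
    (by rw [h140, pvSplitMinMax 3 6 a (by omega)]; simp [List.map_append])
    (by
      intro p hp
      rcases List.mem_append.mp hp with h | h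
      · fin_cases h <;> simp
      · obtain ⟨i, hi2, rfl⟩ := List.mem_map.mp h
        have := (PySem.List.mem_pyRange_one.mp hi2).2; simp; omega)
  -- stage 80 over [10, c): overwrites the 110-keys ≥ 10, appends up to c
  have h80 := pvStage 80 (fun _ => (110:Int)) 10 (max b 10) c
    ([((0:Int), (250:Int)), (1, 200), (2, 170)]
      ++ (PySem.List.pyRange 3 (min a 6) 1).map (fun i => (i, 140))
      ++ (PySem.List.pyRange 6 (min b 10) 1).map (fun i => (i, 110)))
    _ (by omega) (by omega)
    (by rw [h110, pvSplitMinMax 6 10 b (by omega)]; simp [List.map_append, List.append_assoc])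
    (by
      intro p hp
      rcases List.mem_append.mp hp with h | h
      · rcases List.mem_append.mp h with h | h
        · fin_cases h <;> simp
        · obtain ⟨i, hi2, rfl⟩ := List.mem_map.mp h
          have := (PySem.List.mem_pyRange_one.mp hi2).2; simp; omega
      · obtain ⟨i, hi2, rfl⟩ := List.mem_map.mp h
        have := (PySem.List.mem_pyRange_one.mp hi2).2; simp; omega)
  -- stage 50 over [c, n): all existing keys are < c, pure fresh append
  have h50 := pvStage 50 (fun _ => (0:Int)) c c n
    ([((0:Int), (250:Int)), (1, 200), (2, 170)]
      ++ (PySem.List.pyRange 3 (min a 6) 1).map (fun i => (i, 140))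
      ++ (PySem.List.pyRange 6 (min b 10) 1).map (fun i => (i, 110))
      ++ (PySem.List.pyRange 10 c 1).map (fun i => (i, 80)))
    _ le_rfl (by omega)
    (by rw [h80, PySem.List.pyRange_one_eq_nil le_rfl]; simp)
    (by
      intro p hp
      rcases List.mem_append.mp hp with h | h
      · rcases List.mem_append.mp h with h | h
        · rcases List.mem_append.mp h with h | h
          · fin_cases h <;> simp <;> omega
          · obtain ⟨i, hi2, rfl⟩ := List.mem_map.mp h
            have := (PySem.List.mem_pyRange_one.mp hi2).2; simp; omega
        · obtain ⟨i, hi2, rfl⟩ := List.mem_map.mp h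
          have := (PySem.List.mem_pyRange_one.mp hi2).2; simp; omega
      · obtain ⟨i, hi2, rfl⟩ := List.mem_map.mp h
        have := (PySem.List.mem_pyRange_one.mp hi2).2; simp; omega)
  rw [h50]

-- A's filtered/weighted list, computed in the same closed form for n ≥ 16
lemma pvFilterItems (n : Int) (h16 : 16 ≤ n) :
    ((PySem.List.pyRange 0 n 1).filter
        (fun i => pvAssignedB (PySem.Int.floordiv n 4) (PySem.Int.floordiv n 2)
          (PySem.Int.floordiv (3 * n) 4) i)).map
        (fun i => (i, pvWeightB (PySem.Int.floordiv (3 * n) 4) i)) =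
      [((0:Int), (250:Int)), (1, 200), (2, 170)]
        ++ (PySem.List.pyRange 3 (min (PySem.Int.floordiv n 4) 6) 1).map (fun i => (i, 140))
        ++ (PySem.List.pyRange 6 (min (PySem.Int.floordiv n 2) 10) 1).map (fun i => (i, 110))
        ++ (PySem.List.pyRange 10 (PySem.Int.floordiv (3 * n) 4) 1).map (fun i => (i, 80))
        ++ (PySem.List.pyRange (PySem.Int.floordiv (3 * n) 4) n 1).map (fun i => (i, 50)) := by
  have hfd4 : PySem.Int.floordiv n 4 = n / 4 := PySem.Int.floordiv_eq_ediv_of_pos (by omega)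
  have hfd2 : PySem.Int.floordiv n 2 = n / 2 := PySem.Int.floordiv_eq_ediv_of_pos (by omega)
  have hfd34 : PySem.Int.floordiv (3 * n) 4 = (3 * n) / 4 := PySem.Int.floordiv_eq_ediv_of_pos (by omega)
  set a := PySem.Int.floordiv n 4 with ha
  set b := PySem.Int.floordiv n 2 with hb
  set c := PySem.Int.floordiv (3 * n) 4 with hc
  rw [hfd4] at ha; rw [hfd2] at hb; rw [hfd34] at hc
  rw [PySem.List.pyRange_one_append 0 3 n (by omega) (by omega),
      PySem.List.pyRange_one_append 3 (min a 6) n (by omega) (by omega),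
      PySem.List.pyRange_one_append (min a 6) 6 n (by omega) (by omega),
      PySem.List.pyRange_one_append 6 (min b 10) n (by omega) (by omega),
      PySem.List.pyRange_one_append (min b 10) 10 n (by omega) (by omega),
      PySem.List.pyRange_one_append 10 c n (by omega) (by omega)]
  simp only [List.filter_append, List.map_append]
  have hseg0 : ((PySem.List.pyRange 0 3 1).filter (fun i => pvAssignedB a b c i)).map
      (fun i => (i, pvWeightB c i)) = [((0:Int), (250:Int)), (1, 200), (2, 170)] := by
    have h3 : PySem.List.pyRange 0 3 1 = [0, 1, 2] := by decide
    have p0 : pvAssignedB a b c 0 = true := by unfold pvAssignedB; simp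
    have p1 : pvAssignedB a b c 1 = true := by unfold pvAssignedB; simp
    have p2 : pvAssignedB a b c 2 = true := by unfold pvAssignedB; simp
    have w0 : pvWeightB c 0 = 250 := by unfold pvWeightB; split_ifs <;> omega
    have w1 : pvWeightB c 1 = 200 := by unfold pvWeightB; split_ifs <;> omega
    have w2 : pvWeightB c 2 = 170 := by unfold pvWeightB; split_ifs <;> omega
    rw [h3]
    simp [List.filter_nil, p0, p1, p2, w0, w1, w2]
  rw [hseg0]
  rw [pvSegKeep _ _ 3 (min a 6) 140 (by
    intro i h1 h2
    constructor
    · unfold pvAssignedB; simp only [Bool.or_eq_true, decide_eq_true_eq]; omega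
    · have : pvWeightB c i = 140 := by unfold pvWeightB; split_ifs <;> omega
      rw [this])]
  rw [pvSegDrop _ (min a 6) 6 (by
    intro i h1 h2
    unfold pvAssignedB
    simp only [Bool.or_eq_false_iff, Bool.and_eq_false_iff, decide_eq_false_iff_not, not_lt, not_le]
    omega)]
  rw [pvSegKeep _ _ 6 (min b 10) 110 (by
    intro i h1 h2
    constructor
    · unfold pvAssignedB
      simp only [Bool.or_eq_true, Bool.and_eq_true, decide_eq_true_eq]
      omega
    · have : pvWeightB c i = 110 := by unfold pvWeightB; split_ifs <;> omega
      rw [this])]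
  rw [pvSegDrop _ (min b 10) 10 (by
    intro i h1 h2
    unfold pvAssignedB
    simp only [Bool.or_eq_false_iff, Bool.and_eq_false_iff, decide_eq_false_iff_not, not_lt, not_le]
    omega)]
  rw [pvSegKeep _ _ 10 c 80 (by
    intro i h1 h2
    constructor
    · unfold pvAssignedB; simp only [Bool.or_eq_true, decide_eq_true_eq]; omega
    · have : pvWeightB c i = 80 := by unfold pvWeightB; split_ifs <;> omega
      rw [this])]
  rw [pvSegKeep _ _ c n 50 (by
    intro i h1 h2
    constructor
    · unfold pvAssignedB; simp only [Bool.or_eq_true, decide_eq_true_eq]; omega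
    · have : pvWeightB c i = 50 := by unfold pvWeightB; split_ifs <;> omega
      rw [this])]
  simp [List.append_assoc]

-- ===== VERDICT (by name: the statement is the Claim_ definition above) =====
theorem construct_airfraight_loadindsystems_spec : Claim_equal_construct_airfraight_loadindsystems := by
  intro n _
  unfold Spec_construct_airfraight_loadindsystems
  by_cases h16 : 16 ≤ n
  · -- large n: both sides equal the closed-form band list
    have hab : PySem.Int.floordiv n 4 ≤ PySem.Int.floordiv n 2 := by
      rw [PySem.Int.floordiv_eq_ediv_of_pos (by omega), PySem.Int.floordiv_eq_ediv_of_pos (by omega)]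
      omega
    have hA := pvFoldA n hab n.toNat
    rw [Int.toNat_of_nonneg (by omega : (0:Int) ≤ n)] at hA
    unfold construct_airfraight_loadindsystems
    rw [hA, pvFilterItems n h16, pvAltItems n h16]
  · by_cases h1 : 1 ≤ n
    · -- 1 ≤ n ≤ 15: finitely many cases, both sides compute
      have h15 : n ≤ 15 := by omega
      interval_cases n <;> decide
    · -- n ≤ 0: every loop range is empty on both sides
      have hn : n ≤ 0 := by omega
      have hfd4 : PySem.Int.floordiv n 4 = n / 4 := PySem.Int.floordiv_eq_ediv_of_pos (by omega)
      have hfd2 : PySem.Int.floordiv n 2 = n / 2 := PySem.Int.floordiv_eq_ediv_of_pos (by omega)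
      have hfd34 : PySem.Int.floordiv (3 * n) 4 = (3 * n) / 4 := PySem.Int.floordiv_eq_ediv_of_pos (by omega)
      unfold construct_airfraight_loadindsystems
      simp only [construct_airfraight_loadindsystems_alt]
      rw [if_neg (show ¬ n > 0 by omega), if_neg (show ¬ n > 1 by omega),
          if_neg (show ¬ n > 2 by omega)]
      rw [PySem.List.pyRange_one_eq_nil (show n ≤ 0 by omega),
          PySem.List.pyRange_one_eq_nil (show PySem.Int.floordiv n 4 ≤ 3 by rw [hfd4]; omega),
          PySem.List.pyRange_one_eq_nil (show PySem.Int.floordiv n 2 ≤ 6 by rw [hfd2]; omega),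
          PySem.List.pyRange_one_eq_nil (show PySem.Int.floordiv (3 * n) 4 ≤ 10 by rw [hfd34]; omega),
          PySem.List.pyRange_one_eq_nil (show n ≤ PySem.Int.floordiv (3 * n) 4 by rw [hfd34]; omega)]
      rfl
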